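-- pv_equiv track=rewrite | github.com/mj25200/Python-2048 | j2048_motor_47742.py | mover_esquerda
-- ===== SOURCE A (Python) =====
-- def mover_esquerda(uma_lista):
--     nova_lista=[]
--     for k in range(len(uma_lista)):
--         if uma_lista[k] !=0:
--             nova_lista.append(uma_lista[k])
--     while len(nova_lista) != len(uma_lista):
--         nova_lista.append(0)
--     return nova_lista
-- ===== SOURCE B (Python) =====
-- def mover_esquerda(uma_lista):
--     # stable sort: nonzero elements (key False) keep order at the front, zeros sink to the end
--     return sorted(uma_lista, key=lambda x: x == 0)
-- ===== Notes on version B (the rewrite author's own statement) =====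
-- stated objective: idiomatic
-- what changed: Replaces the index-loop filter plus zero-padding while-loop with a single stable sort keyed on x == 0, whose stability keeps nonzero elements in order at the front and collects zeros at the end.
import Mathlib
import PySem

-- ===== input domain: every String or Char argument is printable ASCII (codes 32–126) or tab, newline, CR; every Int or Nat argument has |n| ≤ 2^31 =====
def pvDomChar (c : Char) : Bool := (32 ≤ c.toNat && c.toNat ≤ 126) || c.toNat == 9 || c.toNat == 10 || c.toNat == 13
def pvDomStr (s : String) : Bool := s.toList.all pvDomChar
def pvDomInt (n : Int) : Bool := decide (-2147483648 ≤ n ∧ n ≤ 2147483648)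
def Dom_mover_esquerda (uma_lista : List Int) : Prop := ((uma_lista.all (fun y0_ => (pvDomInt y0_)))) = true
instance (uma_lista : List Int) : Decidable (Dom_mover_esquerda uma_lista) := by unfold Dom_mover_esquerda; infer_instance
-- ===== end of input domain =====

-- B replaces the filter-then-pad loop with a single stable sort keyed on x == 0 (idiomatic one-liner).


-- ===== PORT A =====
-- the 'while len(nova_lista) != len(uma_lista): nova_lista.append(0)' loop; since the loop
-- body only grows nova_lista, '≠' is '<' on every reachable state (Python would diverge otherwise)
def pvPadTo (target : Nat) (nova : List Int) : List Int :=
  if nova.length < target then pvPadTo target (nova ++ [0]) else nova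
termination_by target - nova.length
decreasing_by simp; omega

def mover_esquerda (uma_lista : List Int) : List Int :=
  -- for k in range(len(uma_lista)): if uma_lista[k] != 0: nova_lista.append(uma_lista[k])
  -- (index k is always in range, so xs[k] is PySem.List.pyGetD)
  let nova_lista := (PySem.List.pyRange 0 uma_lista.length 1).foldl
    (fun acc k => if PySem.List.pyGetD uma_lista k 0 ≠ 0 then acc ++ [PySem.List.pyGetD uma_lista k 0] else acc) []
  pvPadTo uma_lista.length nova_lista

-- ===== PORT B =====
def mover_esquerda_alt (uma_lista : List Int) : List Int :=
  PySem.List.sorted uma_lista (fun x => decide (x = 0))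

-- ===== PRECONDITION & SPEC =====
def Spec_mover_esquerda (uma_lista : List Int) (out : List Int) : Prop := out = mover_esquerda_alt uma_lista
instance (uma_lista : List Int) (out : List Int) : Decidable (Spec_mover_esquerda uma_lista out) := by unfold Spec_mover_esquerda; infer_instance

-- ===== CLAIM (what is proved, stated in full; the proofs are below) =====
def Claim_equal_mover_esquerda : Prop := ∀ (uma_lista : List Int), Dom_mover_esquerda uma_lista → Spec_mover_esquerda uma_lista (mover_esquerda uma_lista)

-- ===== LEMMAS AND PROOFS =====

lemma pvPadTo_eq (t : Nat) (nova : List Int) :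
    pvPadTo t nova = nova ++ List.replicate (t - nova.length) 0 := by
  fun_induction pvPadTo t nova with
  | case1 nova h ih =>
      rw [ih]
      have hk : t - nova.length = (t - (nova.length + 1)) + 1 := by omega
      simp only [List.length_append, List.length_singleton]
      rw [hk, List.replicate_succ]
      simp
  | case2 nova h =>
      have hz : t - nova.length = 0 := by omega
      simp [hz]

-- insert into p ++ q lands exactly between them when 'before' rejects all of p and accepts all of q
lemma pvInsertBy_middle (before : Int → Int → Bool) (x : Int) (p q : List Int)
    (hp : ∀ y ∈ p, before x y = false) (hq : ∀ y ∈ q, before x y = true) :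
    PySem.List.insertBy before x (p ++ q) = p ++ x :: q := by
  induction p with
  | nil =>
      cases q with
      | nil => simp [PySem.List.insertBy]
      | cons z zs => simp [PySem.List.insertBy, hq z (by simp)]
  | cons a p ih =>
      have ha : before x a = false := hp a (by simp)
      simp [PySem.List.insertBy, ha, ih (fun y hy => hp y (by simp [hy])) ]

-- foldl-insertBy invariant: processed nonzeros stay in front, zeros collect behind
lemma pvSorted_foldl (l : List Int) : ∀ (p q : List Int),
    (∀ y ∈ p, y ≠ 0) → (∀ y ∈ q, y = 0) →
    l.foldl (fun acc x => PySem.List.insertBy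
        (fun a b => decide ((decide (a = 0) : Bool) < (decide (b = 0) : Bool))) x acc) (p ++ q)
      = (p ++ l.filter (fun x => decide (x ≠ 0))) ++ (q ++ l.filter (fun x => decide (x = 0))) := by
  induction l with
  | nil => intro p q _ _; simp
  | cons a l ih =>
      intro p q hp hq
      by_cases ha : a = 0
      · have hstep : PySem.List.insertBy
            (fun a b => decide ((decide (a = 0) : Bool) < (decide (b = 0) : Bool))) a (p ++ q)
            = (p ++ q) ++ [a] := by
          apply PySem.List.insertBy_of_forall_not_before
          intro y _
          simp [ha]
        simp only [List.foldl_cons, hstep, List.append_assoc]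
        rw [ih p (q ++ [a]) hp (by intro y hy; rcases List.mem_append.1 hy with h | h
                                   · exact hq y h
                                   · simp at h; omega)]
        simp [ha, List.append_assoc]
      · have hstep : PySem.List.insertBy
            (fun a b => decide ((decide (a = 0) : Bool) < (decide (b = 0) : Bool))) a (p ++ q)
            = p ++ a :: q := by
          apply pvInsertBy_middle
          · intro y hy; simp [ha, hp y hy]
          · intro y hy; simp [ha, hq y hy]
        simp only [List.foldl_cons, hstep]
        have : p ++ a :: q = (p ++ [a]) ++ q := by simp
        rw [this, ih (p ++ [a]) q (by intro y hy; rcases List.mem_append.1 hy with h | h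
                                      · exact hp y h
                                      · simp at h; omega) hq]
        simp [ha]

lemma pvSorted_char (l : List Int) :
    PySem.List.sorted l (fun x => decide (x = 0))
      = l.filter (fun x => decide (x ≠ 0)) ++ l.filter (fun x => decide (x = 0)) := by
  rw [PySem.List.sorted_eq_foldl_insertBy]
  have := pvSorted_foldl l [] [] (by simp) (by simp)
  simpa using this

lemma pvFilter_zero_replicate (l : List Int) :
    l.filter (fun x => decide (x = 0)) = List.replicate ((l.filter (fun x => decide (x = 0))).length) (0 : Int) := by
  rw [List.eq_replicate_iff]
  refine ⟨rfl, ?_⟩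
  intro b hb
  have := List.of_mem_filter hb
  simpa using this

lemma pvFilter_len (l : List Int) :
    (l.filter (fun x => !decide (x = 0))).length + (l.filter (fun x => decide (x = 0))).length = l.length := by
  induction l with
  | nil => simp
  | cons a l ih =>
      by_cases ha : a = 0 <;> simp [ha] <;> omega

-- ===== VERDICT (by name: the statement is the Claim_ definition above) =====
theorem mover_esquerda_spec : Claim_equal_mover_esquerda := by
  intro l _
  unfold Spec_mover_esquerda mover_esquerda mover_esquerda_alt
  show pvPadTo l.length (List.foldl _ [] _) = _
  rw [PySem.List.foldl_pyRange_zero_pyGetD' l (0 : Int)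
      (fun acc x => if x ≠ 0 then acc ++ [x] else acc) []]
  rw [PySem.List.foldl_append_ite_eq_filter]
  rw [pvPadTo_eq, pvSorted_char]
  have h2 := pvFilter_zero_replicate l
  simp only [decide_not, List.nil_append] at ⊢
  rw [show l.length - (l.filter (fun x => !decide (x = 0))).length
        = (l.filter (fun x => decide (x = 0))).length by
      have h1 := pvFilter_len l
      omega]
  rw [← h2]
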